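-- pv_equiv track=rewrite | github.com/davidcse/nlpScript | LanguageModelBuilder.py | split_into_sequence_array
-- ===== SOURCE A (Python) =====
-- def split_into_sequence_array(dev_set_corpus):
--     dev_set_sentences = dev_set_corpus.split("\n")
--     dev_set_sequence = []
--     for sent in dev_set_sentences:
--         tokens = sent.split(" ")
--         for t in tokens:
--             dev_set_sequence.append(t)
--     return dev_set_sequence
-- ===== SOURCE B (Python) =====
-- def split_into_sequence_array(dev_set_corpus):
--     dev_set_sequence = []
--     cur = []
--     for ch in dev_set_corpus:
--         if ch == " " or ch == "\n":
--             dev_set_sequence.append("".join(cur))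
--             cur = []
--         else:
--             cur.append(ch)
--     dev_set_sequence.append("".join(cur))
--     return dev_set_sequence
-- ===== Notes on version B (the rewrite author's own statement) =====
-- stated objective: alternative
-- what changed: Replaced the two-level split-and-flatten (split on newline, then split each sentence on space and append) by a single character-by-character scan that builds each token in an accumulator and flushes it at every space or newline; no split call at all.
import Mathlib
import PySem

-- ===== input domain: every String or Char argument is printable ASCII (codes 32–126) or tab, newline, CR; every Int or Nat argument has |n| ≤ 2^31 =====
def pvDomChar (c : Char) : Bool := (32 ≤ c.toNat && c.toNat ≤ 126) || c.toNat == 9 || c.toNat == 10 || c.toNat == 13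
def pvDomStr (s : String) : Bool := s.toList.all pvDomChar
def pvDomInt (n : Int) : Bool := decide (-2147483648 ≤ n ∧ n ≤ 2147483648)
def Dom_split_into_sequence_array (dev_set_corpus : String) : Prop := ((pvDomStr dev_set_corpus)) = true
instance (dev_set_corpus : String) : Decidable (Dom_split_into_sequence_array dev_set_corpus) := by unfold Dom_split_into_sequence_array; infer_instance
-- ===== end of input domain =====

-- B replaces A's two-level split-and-flatten by one character-by-character scan with a token accumulator (alternative, same cost).
-- Single-char str.split has no Str-level wrapper in PySem, so A's port goes through PySem.Chars on .toList (exact).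

-- ===== PORT A =====
def split_into_sequence_array (dev_set_corpus : String) : List String :=
  let dev_set_sentences : List String :=
    (PySem.Chars.splitOn dev_set_corpus.toList ['\n']).map String.ofList
  dev_set_sentences.foldl
    (fun dev_set_sequence sent =>
      let tokens : List String := (PySem.Chars.splitOn sent.toList [' ']).map String.ofList
      tokens.foldl (fun acc t => acc ++ [t]) dev_set_sequence)
    []

-- ===== PORT B =====
-- one pass over the characters; cur is the token being built, flushed at ' ' or '\n'
def split_into_sequence_array_alt (dev_set_corpus : String) : List String :=
  let st : List String × List Char :=
    dev_set_corpus.toList.foldl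
      (fun (p : List String × List Char) ch =>
        if ch = ' ' ∨ ch = '\n' then (p.1 ++ [String.ofList p.2], [])
        else (p.1, p.2 ++ [ch]))
      ([], [])
  st.1 ++ [String.ofList st.2]

-- ===== PRECONDITION & SPEC =====
def Spec_split_into_sequence_array (dev_set_corpus : String) (out : List String) : Prop := out = split_into_sequence_array_alt dev_set_corpus
instance (dev_set_corpus : String) (out : List String) : Decidable (Spec_split_into_sequence_array dev_set_corpus out) := by unfold Spec_split_into_sequence_array; infer_instance

-- ===== CLAIM (what is proved, stated in full; the proofs are below) =====
def Claim_equal_split_into_sequence_array : Prop := ∀ (dev_set_corpus : String), Dom_split_into_sequence_array dev_set_corpus → Spec_split_into_sequence_array dev_set_corpus (split_into_sequence_array dev_set_corpus)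

-- ===== LEMMAS AND PROOFS =====

-- cons a char onto the first piece of a split result
def spCons (c : Char) : List (List Char) → List (List Char)
  | [] => [[c]]
  | h :: r => (c :: h) :: r

-- single-character split, the simple structural form
def sp (d : Char) : List Char → List (List Char)
  | [] => [[]]
  | c :: t => if c = d then [] :: sp d t else spCons c (sp d t)

-- split on either of the two delimiters, structural form
def sp2 : List Char → List (List Char)
  | [] => [[]]
  | c :: t => if c = ' ' ∨ c = '\n' then [] :: sp2 t else spCons c (sp2 t)

-- glue a prefix onto the first piece
def glue (pre : List Char) : List (List Char) → List (List Char)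
  | [] => [pre]
  | h :: r => (pre ++ h) :: r

theorem sp_ne_nil (d : Char) (l : List Char) : sp d l ≠ [] := by
  cases l with
  | nil => simp [sp]
  | cons c t =>
    simp only [sp]
    split_ifs
    · simp
    · cases h : sp d t <;> simp [spCons]

theorem sp2_ne_nil (l : List Char) : sp2 l ≠ [] := by
  cases l with
  | nil => simp [sp2]
  | cons c t =>
    simp only [sp2]
    split_ifs
    · simp
    · cases h : sp2 t <;> simp [spCons]

theorem splitOn_go_single (d : Char) (l : List Char) :
    ∀ (fuel : Nat) (cur : List Char) (acc : List (List Char)), l.length ≤ fuel →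
      PySem.Chars.splitOn.go [d] fuel l cur acc = acc.reverse ++ glue cur.reverse (sp d l) := by
  induction l with
  | nil =>
    intro fuel cur acc _
    cases fuel with
    | zero => rw [PySem.Chars.splitOn.go]; simp [sp, glue]
    | succ f => rw [PySem.Chars.splitOn.go]; simp [sp, glue]; omega
  | cons c t ih =>
    intro fuel cur acc hle
    cases fuel with
    | zero => simp at hle
    | succ fuel =>
      have hstep : PySem.Chars.splitOn.go [d] (fuel+1) (c::t) cur acc =
          if c = d then PySem.Chars.splitOn.go [d] fuel t [] (cur.reverse :: acc)
          else PySem.Chars.splitOn.go [d] fuel t (c::cur) acc := by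
        rw [PySem.Chars.splitOn.go]
        simp only [List.isPrefixOf, Bool.and_true, beq_iff_eq]
        by_cases hc : c = d
        · simp [hc]
        · simp [hc]
          exact fun h => absurd h.symm hc
      rw [hstep]
      have ht : t.length ≤ fuel := by simpa using hle
      split_ifs with hc
      · rw [ih fuel [] (cur.reverse :: acc) ht]
        subst hc
        cases hsp : sp c t with
        | nil => exact absurd hsp (sp_ne_nil c t)
        | cons h r => simp [sp, glue, hsp]
      · rw [ih fuel (c::cur) acc ht]
        cases hsp : sp d t with
        | nil => exact absurd hsp (sp_ne_nil d t)
        | cons h r => simp [sp, hc, glue, spCons, hsp]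

theorem splitOn_single (d : Char) (l : List Char) :
    PySem.Chars.splitOn l [d] = sp d l := by
  rw [PySem.Chars.splitOn, splitOn_go_single d l (l.length + 1) [] [] (by omega)]
  cases hsp : sp d l with
  | nil => exact absurd hsp (sp_ne_nil d l)
  | cons h r => simp [glue]

theorem spCons_append (c : Char) (xs ys : List (List Char)) (hxs : xs ≠ []) :
    spCons c (xs ++ ys) = spCons c xs ++ ys := by
  cases xs with
  | nil => exact absurd rfl hxs
  | cons h r => simp [spCons]

-- splitting on either delimiter at once equals splitting twice and concatenating
theorem sp2_flatMap (cs : List Char) :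
    sp2 cs = (sp '\n' cs).flatMap (sp ' ') := by
  induction cs with
  | nil => simp [sp, sp2]
  | cons c t ih =>
    by_cases hn : c = '\n'
    · subst hn
      simp [sp, sp2, ih]
    · by_cases hs : c = ' '
      · subst hs
        simp [sp, sp2, hn, ih]
        cases hsp : sp '\n' t with
        | nil => exact absurd hsp (sp_ne_nil '\n' t)
        | cons h r => simp [spCons, sp]
      · simp only [sp2, sp, if_neg hn, ih]
        rw [if_neg (by simp [hs, hn] : ¬(c = ' ' ∨ c = '\n'))]
        cases hsp : sp '\n' t with
        | nil => exact absurd hsp (sp_ne_nil '\n' t)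
        | cons h r =>
          rw [show spCons c (h :: r) = (c :: h) :: r from rfl]
          simp only [List.flatMap_cons]
          rw [show sp ' ' (c :: h) = spCons c (sp ' ' h) by simp [sp, hs]]
          rw [← spCons_append c (sp ' ' h) (List.flatMap (sp ' ') r) (sp_ne_nil ' ' h)]

theorem glue_pre (pre : List Char) (xs : List (List Char)) (hxs : xs ≠ []) (c : Char) :
    glue (pre ++ [c]) xs = glue pre (spCons c xs) := by
  cases xs with
  | nil => exact absurd rfl hxs
  | cons h r => simp [glue, spCons]

-- loop invariant for B's single-pass scan
theorem scan_invariant (cs : List Char) :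
    ∀ (out : List String) (cur : List Char),
      (let st := cs.foldl
          (fun (p : List String × List Char) ch =>
            if ch = ' ' ∨ ch = '\n' then (p.1 ++ [String.ofList p.2], [])
            else (p.1, p.2 ++ [ch]))
          (out, cur)
       st.1 ++ [String.ofList st.2])
      = out ++ (glue cur (sp2 cs)).map String.ofList := by
  induction cs with
  | nil =>
    intro out cur
    simp [sp2, glue]
  | cons c t ih =>
    intro out cur
    simp only [List.foldl_cons]
    split_ifs with hc
    · rw [ih (out ++ [String.ofList cur]) []]
      simp only [sp2, if_pos hc]
      cases hsp : sp2 t with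
      | nil => exact absurd hsp (sp2_ne_nil t)
      | cons h r => simp [glue]
    · rw [ih out (cur ++ [c])]
      simp only [sp2, if_neg hc]
      rw [glue_pre cur (sp2 t) (sp2_ne_nil t) c]

-- ===== VERDICT (by name: the statement is the Claim_ definition above) =====
theorem split_into_sequence_array_spec : Claim_equal_split_into_sequence_array := by
  intro s _
  unfold Spec_split_into_sequence_array split_into_sequence_array split_into_sequence_array_alt
  simp only [PySem.List.foldl_append_singleton, PySem.List.foldl_append_eq_flatMap,
    List.flatMap_map, List.nil_append, String.toList_ofList]
  rw [scan_invariant s.toList [] []]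
  rw [splitOn_single]
  have hB : glue [] (sp2 s.toList) = sp2 s.toList := by
    cases hsp : sp2 s.toList with
    | nil => exact absurd hsp (sp2_ne_nil s.toList)
    | cons h r => simp [glue]
  rw [hB, sp2_flatMap]
  simp only [List.map_flatMap, List.nil_append]
  congr 1
  funext l
  rw [splitOn_single]
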